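-- pv_equiv track=rewrite | github.com/Ysh096/swea | 1974_스도쿠검증/s1.py | check_two_case
-- ===== SOURCE A (Python) =====
-- def check_two_case(three_row: list): #세 줄씩 입력이 들어오면
--     one_to_nine = [1, 2, 3, 4, 5, 6, 7, 8, 9]
--     s_1, s_2, s_3 = [], [], []
--     for row in three_row: #한 줄을 검사할 때
--         s_1.extend(row[0:3]) #세 개씩 끊어서 새로운 리스트에 넣어주고
--         s_2.extend(row[3:6])
--         s_3.extend(row[6:9])
--         if sorted(row) != one_to_nine: #한 줄이 조건을 만족하는지 확인
--             return False #이걸 세 번 반복하면 s1, s2, s3에 각각 3*3 숫자가 들어감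
--     if sorted(s_1) != one_to_nine: return False #3*3 배열이 조건을 만족하는지 각각 확인
--     if sorted(s_2) != one_to_nine: return False
--     if sorted(s_3) != one_to_nine: return False
--     return True
-- ===== SOURCE B (Python) =====
-- def check_two_case(three_row: list):
--     # Bitmask validation instead of sort-and-compare: a 9-element group is a
--     # permutation of 1..9 iff every element lies in 1..9 and no value repeats.
--     def valid(group):
--         if len(group) != 9:
--             return False
--         mask = 0
--         for x in group:
--             if x < 1 or x > 9 or (mask >> x) & 1:
--                 return False
--             mask |= 1 << x
--         return True
--
--     if not all(valid(row) for row in three_row):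
--         return False
--     blocks = [[], [], []]
--     for row in three_row:
--         for i in range(3):
--             blocks[i] += row[3 * i: 3 * i + 3]
--     return all(valid(b) for b in blocks)
-- ===== Notes on version B (the rewrite author's own statement) =====
-- stated objective: alternative
-- what changed: Replaces A's sort-and-compare test (sorted(g) == [1..9]) by a single-pass bitmask check (range test plus duplicate bit test) for each group, and restructures the control flow into two stages: validate all rows first, then build the three 3x3 blocks and validate them the same way.
import Mathlib
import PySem

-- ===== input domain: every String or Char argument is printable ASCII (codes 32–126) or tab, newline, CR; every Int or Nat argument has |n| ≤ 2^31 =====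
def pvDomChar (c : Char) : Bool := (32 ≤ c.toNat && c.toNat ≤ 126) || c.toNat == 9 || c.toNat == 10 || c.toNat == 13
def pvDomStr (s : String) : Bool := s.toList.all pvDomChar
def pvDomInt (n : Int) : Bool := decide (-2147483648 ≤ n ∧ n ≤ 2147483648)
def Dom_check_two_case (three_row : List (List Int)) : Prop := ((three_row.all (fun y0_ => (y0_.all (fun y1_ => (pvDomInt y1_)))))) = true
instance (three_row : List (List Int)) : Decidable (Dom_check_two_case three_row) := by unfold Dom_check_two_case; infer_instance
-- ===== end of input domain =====

-- B replaces A's sort-and-compare validation by a single-pass bitmask range/duplicate check per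
-- group, staged as validate-rows-then-build-and-validate-blocks (alternative; same cost).


-- ===== PORT A =====
-- the loop 'for row in three_row' with accumulators s_1,s_2,s_3 and early return
def check_two_case_go (one_to_nine : List Int) :
    List (List Int) → List Int → List Int → List Int → Bool
  | [], s_1, s_2, s_3 =>
    if PySem.List.sorted s_1 (fun x => x) ≠ one_to_nine then false
    else if PySem.List.sorted s_2 (fun x => x) ≠ one_to_nine then false
    else if PySem.List.sorted s_3 (fun x => x) ≠ one_to_nine then false
    else true
  | row :: rest, s_1, s_2, s_3 =>
    let s_1 := s_1 ++ PySem.List.slice row (some 0) (some 3)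
    let s_2 := s_2 ++ PySem.List.slice row (some 3) (some 6)
    let s_3 := s_3 ++ PySem.List.slice row (some 6) (some 9)
    if PySem.List.sorted row (fun x => x) ≠ one_to_nine then false
    else check_two_case_go one_to_nine rest s_1 s_2 s_3

def check_two_case (three_row : List (List Int)) : Bool :=
  let one_to_nine : List Int := [1, 2, 3, 4, 5, 6, 7, 8, 9]
  check_two_case_go one_to_nine three_row [] [] []

-- ===== PORT B =====
-- valid(group): the length test, then one bitmask pass — 'if x < 1 or x > 9 or (mask >> x) & 1',
-- 'mask |= 1 << x'.  (x.toNat is exact: the shifts are reached only after the guard gives 1 ≤ x.)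
def pvValidGo : List Int → Int → Bool
  | [], _ => true
  | x :: rest, mask =>
    if x < 1 ∨ 9 < x ∨ PySem.Int.band (mask >>> x.toNat) 1 ≠ 0 then false
    else pvValidGo rest (PySem.Int.bor mask ((1 : Int) <<< x.toNat))

def pvValid (group : List Int) : Bool :=
  if group.length ≠ 9 then false else pvValidGo group 0

-- blocks = [[], [], []]; for row: for i in range(3): blocks[i] += row[3*i : 3*i+3]
-- (blocks[i] with i = 0,1,2 always in range: List.set / getD are exact here)
def pvAddRow (blocks : List (List Int)) (row : List Int) : List (List Int) :=
  (PySem.List.pyRange 0 3 1).foldl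
    (fun bs i => bs.set i.toNat
      (bs.getD i.toNat [] ++ PySem.List.slice row (some (3 * i)) (some (3 * i + 3)))) blocks

def check_two_case_alt (three_row : List (List Int)) : Bool :=
  if !(three_row.all pvValid) then false
  else (three_row.foldl pvAddRow [[], [], []]).all pvValid

-- ===== PRECONDITION & SPEC =====
def Spec_check_two_case (three_row : List (List Int)) (out : Bool) : Prop := out = check_two_case_alt three_row
instance (three_row : List (List Int)) (out : Bool) : Decidable (Spec_check_two_case three_row out) := by unfold Spec_check_two_case; infer_instance

-- ===== CLAIM (what is proved, stated in full; the proofs are below) =====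
def Claim_equal_check_two_case : Prop := ∀ (three_row : List (List Int)), Dom_check_two_case three_row → Spec_check_two_case three_row (check_two_case three_row)

-- ===== LEMMAS AND PROOFS =====

-- closed form of A's loop: all rows valid, and the three accumulated blocks valid
theorem check_two_case_go_eq (one : List Int) (rows : List (List Int))
    (s1 s2 s3 : List Int) :
    check_two_case_go one rows s1 s2 s3 =
      (rows.all (fun r => PySem.List.sorted r (fun x => x) = one) &&
       decide (PySem.List.sorted (s1 ++ rows.flatMap (fun r => PySem.List.slice r (some 0) (some 3))) (fun x => x) = one) &&
       decide (PySem.List.sorted (s2 ++ rows.flatMap (fun r => PySem.List.slice r (some 3) (some 6))) (fun x => x) = one) &&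
       decide (PySem.List.sorted (s3 ++ rows.flatMap (fun r => PySem.List.slice r (some 6) (some 9))) (fun x => x) = one)) := by
  induction rows generalizing s1 s2 s3 with
  | nil =>
    simp [check_two_case_go, Bool.and_assoc]
  | cons row rest ih =>
    simp only [check_two_case_go]
    split_ifs with h
    · simp [List.all_cons, h]
    · rw [ih]
      rw [not_ne_iff] at h
      simp only [List.all_cons, List.flatMap_cons, h, decide_true,
        Bool.true_and, List.append_assoc, PySem.List.slice_zero_start, Bool.and_assoc]

-- one row of B's block-building loop, written out
theorem pvAddRow_triple (b0 b1 b2 row : List Int) :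
    pvAddRow [b0, b1, b2] row =
      [b0 ++ PySem.List.slice row (some 0) (some 3),
       b1 ++ PySem.List.slice row (some 3) (some 6),
       b2 ++ PySem.List.slice row (some 6) (some 9)] := by
  rfl

-- closed form of B's block-building loop
theorem foldl_pvAddRow (rows : List (List Int)) (b0 b1 b2 : List Int) :
    rows.foldl pvAddRow [b0, b1, b2] =
      [b0 ++ rows.flatMap (fun r => PySem.List.slice r (some 0) (some 3)),
       b1 ++ rows.flatMap (fun r => PySem.List.slice r (some 3) (some 6)),
       b2 ++ rows.flatMap (fun r => PySem.List.slice r (some 6) (some 9))] := by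
  induction rows generalizing b0 b1 b2 with
  | nil => simp
  | cons r t ih =>
    rw [List.foldl_cons, pvAddRow_triple, ih]
    simp [List.append_assoc]

-- the Python test '(mask >> x) & 1' is the x-th bit of the mask
theorem pvBit_iff (m k : Nat) :
    (PySem.Int.band ((m : Int) >>> k) 1 ≠ 0) ↔ m.testBit k = true := by
  have h1 : ((m : Int) >>> k) = ((m >>> k : Nat) : Int) := by
    simp [Int.shiftRight_eq, Int.natCast_shiftRight]
  rw [h1, show ((1 : Int)) = ((1 : Nat) : Int) from rfl, PySem.Int.band_natCast]
  rw [Nat.and_one_is_mod, Nat.shiftRight_eq_div_pow]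
  simp only [Nat.testBit, Nat.and_comm 1, Nat.and_one_is_mod, Nat.shiftRight_eq_div_pow]
  constructor
  · intro h
    simp only [bne_iff_ne, ne_eq]
    omega
  · intro h
    simp only [bne_iff_ne, ne_eq] at h
    omega

theorem pvShiftBit (k i : Nat) : (1 <<< k : Nat).testBit i = decide (k = i) := by
  rw [Nat.shiftLeft_eq, one_mul, Nat.testBit_two_pow]

theorem pvBorCast (m : Nat) (x : Int) :
    PySem.Int.bor ((m : Int)) ((1 : Int) <<< x.toNat) =
      (((m ||| (1 <<< x.toNat)) : Nat) : Int) := by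
  have h : ((1 : Int) <<< x.toNat) = (((1 <<< x.toNat : Nat)) : Int) := by
    simp [Int.shiftLeft_eq, Nat.shiftLeft_eq]
  rw [h, PySem.Int.bor_natCast]

-- the bitmask loop accepts exactly: all elements in 1..9, no duplicates, none already in the mask
theorem pvValidGo_iff (g : List Int) (m : Nat) :
    pvValidGo g ((m : Nat) : Int) = true ↔
      ((∀ x ∈ g, 1 ≤ x ∧ x ≤ 9 ∧ m.testBit x.toNat = false) ∧ g.Nodup) := by
  induction g generalizing m with
  | nil => simp [pvValidGo]
  | cons x t ih =>
    rw [pvValidGo]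
    by_cases hb : x < 1 ∨ 9 < x ∨ PySem.Int.band ((m : Int) >>> x.toNat) 1 ≠ 0
    · rw [if_pos hb]
      simp only [Bool.false_eq_true, false_iff]
      rintro ⟨hall, -⟩
      obtain ⟨h1, h2, h3⟩ := hall x (List.mem_cons_self)
      rcases hb with hb | hb | hb
      · omega
      · omega
      · rw [(pvBit_iff m x.toNat).mp hb] at h3; cases h3
    · rw [if_neg hb]
      push Not at hb
      obtain ⟨hx1, hx9, hband⟩ := hb
      have hbit : m.testBit x.toNat = false := by
        cases h : m.testBit x.toNat
        · rfl
        · exact absurd ((pvBit_iff m x.toNat).mpr h) (by simpa using hband)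
      rw [pvBorCast, ih]
      constructor
      · rintro ⟨hall, hnd⟩
        have hnotin : x ∉ t := by
          intro hx
          obtain ⟨_, _, h3⟩ := hall x hx
          rw [Nat.testBit_or, pvShiftBit] at h3
          simp at h3
        refine ⟨?_, List.nodup_cons.mpr ⟨hnotin, hnd⟩⟩
        intro y hy
        rcases List.mem_cons.mp hy with rfl | hy
        · exact ⟨hx1, hx9, hbit⟩
        · obtain ⟨h1, h2, h3⟩ := hall y hy
          rw [Nat.testBit_or] at h3
          exact ⟨h1, h2, by simpa using (Bool.or_eq_false_iff.mp h3).1⟩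
      · rintro ⟨hall, hnd⟩
        have hnotin := (List.nodup_cons.mp hnd).1
        refine ⟨?_, (List.nodup_cons.mp hnd).2⟩
        intro y hy
        obtain ⟨h1, h2, h3⟩ := hall y (List.mem_cons_of_mem x hy)
        refine ⟨h1, h2, ?_⟩
        rw [Nat.testBit_or, pvShiftBit, h3]
        have hxy : x ≠ y := fun he => hnotin (he ▸ hy)
        have hne : x.toNat ≠ y.toNat := by omega
        simp [hne]

-- valid(g) accepts exactly the permutations of 1..9
theorem pvValid_iff (g : List Int) :
    pvValid g = true ↔ g.Perm [1, 2, 3, 4, 5, 6, 7, 8, 9] := by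
  unfold pvValid
  constructor
  · intro h
    split_ifs at h with hl
    have h0 : pvValidGo g (((0 : Nat) : Int)) = true := by simpa using h
    obtain ⟨hall, hnd⟩ := (pvValidGo_iff g 0).mp h0
    have hsub : g ⊆ [1, 2, 3, 4, 5, 6, 7, 8, 9] := by
      intro x hx
      obtain ⟨h1, h2, _⟩ := hall x hx
      simp only [List.mem_cons, List.not_mem_nil, or_false]
      omega
    have hlen : g.length = 9 := by omega
    exact List.Subperm.perm_of_length_le (List.Nodup.subperm hnd hsub) (by simp [hlen])
  · intro hp
    have hlen : g.length = 9 := by simpa using hp.length_eq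
    rw [if_neg (by omega)]
    have h0 : pvValidGo g (((0 : Nat) : Int)) = true := by
      rw [pvValidGo_iff]
      refine ⟨?_, hp.nodup_iff.mpr (by decide)⟩
      intro x hx
      have : x ∈ [(1 : Int), 2, 3, 4, 5, 6, 7, 8, 9] := hp.mem_iff.mp hx
      simp only [List.mem_cons, List.not_mem_nil, or_false] at this
      refine ⟨by omega, by omega, by simp⟩
    simpa using h0

-- sorted(g) == [1..9] also says exactly: g is a permutation of 1..9
theorem pvSorted_iff (g : List Int) :
    PySem.List.sorted g (fun x => x) = [1, 2, 3, 4, 5, 6, 7, 8, 9] ↔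
      g.Perm [1, 2, 3, 4, 5, 6, 7, 8, 9] := by
  constructor
  · intro h
    have hp := PySem.List.sorted_perm (xs := g) (key := fun x : Int => x) (rev := false)
    rw [h] at hp
    exact hp.symm
  · intro hp
    apply PySem.List.sorted_eq_of_perm_of_pairwise_lt
    · exact hp.symm
    · decide

-- B's bitmask test computes A's sorted-comparison test
theorem pvValid_eq (g : List Int) :
    pvValid g = decide (PySem.List.sorted g (fun x => x) = [1, 2, 3, 4, 5, 6, 7, 8, 9]) := by
  by_cases hp : g.Perm [1, 2, 3, 4, 5, 6, 7, 8, 9]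
  · rw [(pvValid_iff g).mpr hp, decide_eq_true ((pvSorted_iff g).mpr hp)]
  · have h1 : pvValid g = false := by
      cases h : pvValid g
      · rfl
      · exact absurd ((pvValid_iff g).mp h) hp
    rw [h1]
    symm
    simp only [decide_eq_false_iff_not]
    exact fun hs => hp ((pvSorted_iff g).mp hs)

-- ===== VERDICT (by name: the statement is the Claim_ definition above) =====
theorem check_two_case_spec : Claim_equal_check_two_case := by
  intro tr _
  unfold Spec_check_two_case check_two_case check_two_case_alt
  rw [check_two_case_go_eq, foldl_pvAddRow,
    show pvValid = fun g => decide (PySem.List.sorted g (fun x => x) = [1, 2, 3, 4, 5, 6, 7, 8, 9])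
      from funext pvValid_eq]
  simp only [List.all_cons, List.all_nil, List.nil_append, Bool.and_true]
  cases h : tr.all (fun r => decide (PySem.List.sorted r (fun x => x) = [1, 2, 3, 4, 5, 6, 7, 8, 9]))
  · simp
  · simp [Bool.and_assoc]
    rfl
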